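-- pv_equiv track=rewrite | github.com/depromeet/algoStudy | medium/1902/190214/gyukebox.py | solve
-- ===== SOURCE A (Python) =====
-- def winner(x):
--     return 'BOB' if x % 2 == 0 else 'ANDY'
--
-- def solve(n, arr):
--     turn = 0
--     idx = 0
--     for i in range(1, n):
--         if arr[i] > arr[idx]:
--             turn += 1
--             idx = i
--     return winner(turn)
-- ===== SOURCE B (Python) =====
-- def winner(x):
--     return 'BOB' if x % 2 == 0 else 'ANDY'
--
-- def solve(n, arr):
--     maxima = set()
--     cur = None
--     for x in (arr[:n] if n > 0 else []):
--         if cur is None or x > cur: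
--             cur = x
--         maxima.add(cur)
--     return winner(max(len(maxima) - 1, 0))
-- ===== Notes on version B (the rewrite author's own statement) =====
-- stated objective: alternative
-- what changed: Replaces the index-tracking update counter with a build-then-count formulation: accumulate the running maxima of arr[:n] into a set and decide the winner from the count of distinct prefix maxima minus one.
import Mathlib
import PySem

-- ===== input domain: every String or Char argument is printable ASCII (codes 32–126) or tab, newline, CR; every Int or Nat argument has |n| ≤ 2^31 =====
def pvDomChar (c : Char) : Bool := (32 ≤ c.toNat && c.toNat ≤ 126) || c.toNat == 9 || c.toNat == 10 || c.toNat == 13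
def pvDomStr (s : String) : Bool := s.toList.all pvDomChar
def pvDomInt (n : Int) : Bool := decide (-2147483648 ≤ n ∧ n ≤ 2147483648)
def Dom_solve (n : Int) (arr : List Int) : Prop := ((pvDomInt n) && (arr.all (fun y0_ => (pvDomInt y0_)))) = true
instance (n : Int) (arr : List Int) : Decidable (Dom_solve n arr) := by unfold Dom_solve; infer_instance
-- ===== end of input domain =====

-- B replaces A's index-tracking single pass by collecting the distinct prefix maxima
-- of arr[:n] into a set and deciding the winner from their count minus one (objective: alternative).

-- ===== PORT A =====
def winnerA (x : Int) : String := if PySem.Int.mod x 2 = 0 then "BOB" else "ANDY"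

def stepA (arr : List Int) (s : Int × Int) (i : Int) : Int × Int :=
  match PySem.List.pyGet? arr i, PySem.List.pyGet? arr s.2 with
  | some ai, some aidx => if ai > aidx then (s.1 + 1, i) else s
  | _, _ => s  -- unreachable under Pre_solve: Python raises IndexError here

def solve (n : Int) (arr : List Int) : String :=
  let st := (PySem.List.pyRange 1 n 1).foldl (stepA arr) (0, 0)
  winnerA st.1

-- ===== PORT B =====
-- Source B's winner is character-for-character the same helper as A's; both ports share `winnerA`.
def stepB (st : PySem.Set Int × Option Int) (x : Int) : PySem.Set Int × Option Int :=
  let cur : Int :=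
    match st.2 with
    | none => x
    | some c => if x > c then x else c
  (PySem.Set.add st.1 cur, some cur)

def solve_alt (n : Int) (arr : List Int) : String :=
  let pfx := if 0 < n then PySem.List.slice arr none (some n) else []
  let st := pfx.foldl stepB (PySem.Set.empty, none)
  winnerA (max ((PySem.Set.len st.1 : Int) - 1) 0)

-- ===== PRECONDITION & SPEC =====
-- Pre_solve excludes exactly the inputs where Python A raises IndexError: 2 ≤ n but n > len(arr).
def Pre_solve (n : Int) (arr : List Int) : Prop := n < 2 ∨ n ≤ (arr.length : Int)
instance (n : Int) (arr : List Int) : Decidable (Pre_solve n arr) := by unfold Pre_solve; infer_instance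
def pvWitness_solve : Int × List Int := (4, [3, 1, 4, 2])

def Spec_solve (n : Int) (arr : List Int) (out : String) : Prop := out = solve_alt n arr
instance (n : Int) (arr : List Int) (out : String) : Decidable (Spec_solve n arr out) := by unfold Spec_solve; infer_instance

-- ===== CLAIM (what is proved, stated in full; the proofs are below) =====
def Claim_equal_solve : Prop := ∀ (n : Int) (arr : List Int), Dom_solve n arr → Pre_solve n arr → Spec_solve n arr (solve n arr)

-- ===== LEMMAS AND PROOFS =====

-- number of strict records in a list, starting from running maximum c
def recs (c : Int) : List Int → Int
  | [] => 0
  | x :: xs => if c < x then 1 + recs x xs else recs c xs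

lemma recs_nonneg (c : Int) (l : List Int) : 0 ≤ recs c l := by
  induction l generalizing c with
  | nil => simp [recs]
  | cons x xs ih => simp only [recs]; split <;> [linarith [ih x]; exact ih c]

lemma foldA_eq (arr : List Int) (b : Nat) (hb : b ≤ arr.length) :
    ∀ (k a : Nat), b ≤ a + k → ∀ (t : Int) (idx : Nat) (hidx : idx < arr.length),
    ((PySem.List.pyRange (a : Int) (b : Int) 1).foldl (stepA arr) (t, (idx : Int))).1
      = t + recs arr[idx] ((arr.take b).drop a) := by
  intro k
  induction k with
  | zero =>
    intro a hk t idx hidx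
    rw [PySem.List.pyRange_one_eq_nil (by exact_mod_cast Nat.le_of_add_le_add_right (by omega : b + 0 ≤ a + 0))]
    have : (arr.take b).drop a = [] := by
      apply List.drop_eq_nil_of_le
      simp [List.length_take]; omega
    simp [this, recs]
  | succ k ih =>
    intro a hk t idx hidx
    by_cases hab : b ≤ a
    · rw [PySem.List.pyRange_one_eq_nil (by exact_mod_cast hab)]
      have : (arr.take b).drop a = [] := by
        apply List.drop_eq_nil_of_le
        simp [List.length_take]; omega
      simp [this, recs]
    · push_neg at hab
      have ha : a < arr.length := lt_of_lt_of_le hab hb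
      rw [PySem.List.pyRange_one_cons (by exact_mod_cast hab)]
      have hseg : (arr.take b).drop a = arr[a] :: (arr.take b).drop (a + 1) := by
        rw [List.drop_eq_getElem_cons (by simp [List.length_take]; omega)]
        congr 1
        exact List.getElem_take
      have hga : PySem.List.pyGet? arr ((a : Int)) = some arr[a] := by
        simpa using PySem.List.pyGet?_natCast (xs := arr) (n := a) ha
      have hgi : PySem.List.pyGet? arr ((idx : Int)) = some arr[idx] := by
        simpa using PySem.List.pyGet?_natCast (xs := arr) (n := idx) hidx
      simp only [List.foldl_cons, stepA, hga, hgi]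
      by_cases hlt : arr[idx] < arr[a]
      · rw [if_pos hlt]
        have := ih (a + 1) (by omega) (t + 1) a ha
        push_cast at this
        rw [this, hseg]
        simp [recs, hlt]; ring
      · rw [if_neg hlt]
        have := ih (a + 1) (by omega) t idx hidx
        push_cast at this
        rw [this, hseg]
        simp [recs, hlt]



lemma foldB_eq (xs : List Int) : ∀ (s : PySem.Set Int) (c : Int),
    c ∈ s → (∀ y ∈ s, y ≤ c) → s.Nodup →
    (((xs.foldl stepB (s, some c)).1.length : Int)) = (s.length : Int) + recs c xs := by
  induction xs with
  | nil => intro s c _ _ _; simp [recs]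
  | cons x t ih =>
    intro s c hc hub hnd
    rw [List.foldl_cons]
    by_cases hlt : c < x
    · have hnm : x ∉ s := fun hm => absurd (hub _ hm) (by omega)
      have hcur : stepB (s, some c) x = (s ++ [x], some x) := by
        simp [stepB, hlt, PySem.Set.add_of_not_mem hnm]
      rw [hcur]
      rw [ih (s ++ [x]) x (by simp)
        (by intro y hy
            rcases List.mem_append.1 hy with h | h
            · exact le_trans (hub _ h) (le_of_lt hlt)
            · simp at h; omega)
        (by simp [List.nodup_append, hnd]
            intro y hy h2
            exact hnm (h2 ▸ hy))]
      rw [show recs c (x :: t) = 1 + recs x t by simp [recs, hlt]]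
      simp only [List.length_append, List.length_cons, List.length_nil]
      push_cast
      ring
    · have hcur : stepB (s, some c) x = (s, some c) := by
        simp [stepB, show ¬ x > c from by omega, PySem.Set.add_of_mem hc]
      rw [hcur, ih s c hc hub hnd]
      rw [show recs c (x :: t) = recs c t by simp [recs, hlt]]

lemma solve_main (arr : List Int) (m : Nat) (h1 : 1 ≤ m) (h2 : m ≤ arr.length) :
    solve ((m : Nat) : Int) arr = solve_alt ((m : Nat) : Int) arr := by
  have hlen : 0 < arr.length := by omega
  have hp : (arr.take m).length = m := by
    rw [List.length_take]; omega
  have hp0 : 0 < (arr.take m).length := by omega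
  -- A side
  have hA := foldA_eq arr m h2 m 1 (by omega) 0 0 hlen
  push_cast at hA
  -- the sliced prefix is nonempty
  obtain ⟨x, rest, hxr⟩ : ∃ x rest, arr.take m = x :: rest := by
    cases h : arr.take m with
    | nil => rw [h] at hp; simp at hp; omega
    | cons a b => exact ⟨a, b, rfl⟩
  have hx0 : arr[0]'hlen = x := by
    have hg : (arr.take m)[0]'hp0 = arr[0]'hlen := List.getElem_take
    rw [← hg]
    simp [hxr]
  rw [hxr] at hA
  simp only [List.drop_succ_cons, List.drop_zero] at hA
  rw [hx0] at hA
  -- B side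
  have hstep0 : stepB (PySem.Set.empty, none) x = ([x], some x) := by
    simp [stepB, PySem.Set.empty, PySem.Set.add_of_not_mem (List.not_mem_nil)]
  have hB := foldB_eq rest [x] x (by simp) (by simp) (by simp)
  -- assemble
  simp only [solve, solve_alt]
  rw [if_pos (by exact_mod_cast h1 : (0 : Int) < (m : Int))]
  rw [PySem.List.slice_to_natCast arr m]
  rw [hxr, List.foldl_cons, hstep0]
  simp only [PySem.Set.len]
  rw [hA, hB]
  congr 1
  have hr := recs_nonneg x rest
  generalize recs x rest = r at hr ⊢
  simp only [List.length_cons, List.length_nil]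
  push_cast
  omega

-- ===== VERDICT (by name: the statement is the Claim_ definition above) =====
theorem solve_spec : Claim_equal_solve := by
  intro n arr _ hpre
  show solve n arr = solve_alt n arr
  by_cases hn : 0 < n
  · by_cases hle : n ≤ (arr.length : Int)
    · have := solve_main arr n.toNat (by omega) (by omega)
      rwa [show ((n.toNat : Nat) : Int) = n by omega] at this
    · -- Pre_solve forces n = 1 and arr = []
      have hn1 : n = 1 := by rcases hpre with h | h <;> omega
      have harr : arr = [] := by
        cases arr with
        | nil => rfl
        | cons x xs => exfalso; simp at hle; omega
      subst hn1; subst harr; decide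
  · -- n ≤ 0: both loops are empty and both return "BOB"
    simp only [solve, solve_alt]
    rw [PySem.List.pyRange_one_eq_nil (by omega : n ≤ 1)]
    rw [if_neg hn]
    simp only [List.foldl_nil]
    decide
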